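-- pv_equiv track=rewrite | github.com/rochiecuevas/python-challenge | PyPoll/main.py | unique_candidates
-- ===== SOURCE A (Python) =====
-- def unique_candidates (votes_list):
--     tally = [i[2] for i in votes_list] # list of candidates
--     unique = {}
--     for i in tally:
--         if not i in unique:
--             unique[i] = 1
--         else:
--             unique[i] += 1
--     return unique
-- ===== SOURCE B (Python) =====
-- def unique_candidates(votes_list):
--     # Recursive partitioning: take the first remaining candidate, count its
--     # block with a full scan, strip it out, and recurse on what is left.
--     tally = [i[2] for i in votes_list]
--
--     def go(rest):
--         if not rest:
--             return {}
--         c = rest[0]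
--         counts = {c: len([x for x in rest if x == c])}
--         counts.update(go([x for x in rest if x != c]))
--         return counts
--
--     return go(tally)
-- ===== Notes on version B (the rewrite author's own statement) =====
-- stated objective: alternative
-- what changed: Replaces the single accumulating dict pass with a quickselect-style recursive partition: peel off the first candidate, count its whole block by filtering, remove it, and recurse on the shrunken remainder.
import Mathlib
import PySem

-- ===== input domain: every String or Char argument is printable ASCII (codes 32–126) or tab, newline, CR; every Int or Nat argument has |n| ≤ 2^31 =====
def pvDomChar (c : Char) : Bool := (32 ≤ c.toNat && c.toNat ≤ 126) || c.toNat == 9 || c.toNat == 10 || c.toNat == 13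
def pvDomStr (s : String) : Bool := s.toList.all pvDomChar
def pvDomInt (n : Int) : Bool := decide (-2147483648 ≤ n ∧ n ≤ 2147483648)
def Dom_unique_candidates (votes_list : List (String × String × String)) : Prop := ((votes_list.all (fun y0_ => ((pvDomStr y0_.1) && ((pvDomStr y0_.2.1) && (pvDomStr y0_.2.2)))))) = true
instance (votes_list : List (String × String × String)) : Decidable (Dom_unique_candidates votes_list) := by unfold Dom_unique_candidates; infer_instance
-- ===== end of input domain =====

-- B replaces A's single accumulating-dict pass by a recursive partition
-- (count the first candidate's block by filtering, remove it, recurse);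
-- same result, different decomposition (objective: alternative).


-- ===== PORT A =====
def unique_candidates (votes_list : List (String × String × String)) : List (String × Int) :=
  let tally := votes_list.map (fun i => i.2.2)
  let unique := tally.foldl (fun (u : PySem.Dict String Int) i =>
    if !(u.contains i) then u.insert i 1 else u.insert i (u.getD i 0 + 1)) PySem.Dict.empty
  unique.items

-- ===== PORT B =====
-- go(rest): `counts = {c: len(block)}` then `counts.update(go(others))`; every key of
-- go(others) differs from c (others contains no c), so the update appends exactly the
-- recursive items — ported as the cons below, exact here.
def ucGo : List String → List (String × Int)
  | [] => []
  | c :: rest =>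
      let same := (c :: rest).filter (fun x => x == c)
      let others := (c :: rest).filter (fun x => x != c)
      (c, (same.length : Int)) :: ucGo others
termination_by l => l.length
decreasing_by
  simp only [List.filter_cons, bne_self_eq_false, List.length_cons]
  exact Nat.lt_succ_of_le (List.length_filter_le _ _)

def unique_candidates_alt (votes_list : List (String × String × String)) : List (String × Int) :=
  let tally := votes_list.map (fun i => i.2.2)
  ucGo tally

-- ===== PRECONDITION & SPEC =====
def Spec_unique_candidates (votes_list : List (String × String × String)) (out : List (String × Int)) : Prop := out = unique_candidates_alt votes_list
instance (votes_list : List (String × String × String)) (out : List (String × Int)) : Decidable (Spec_unique_candidates votes_list out) := by unfold Spec_unique_candidates; infer_instance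

-- ===== CLAIM (what is proved, stated in full; the proofs are below) =====
def Claim_equal_unique_candidates : Prop := ∀ (votes_list : List (String × String × String)), Dom_unique_candidates votes_list → Spec_unique_candidates votes_list (unique_candidates votes_list)

-- ===== LEMMAS AND PROOFS =====

-- A's insert loop is Counter(tally)
lemma fold_eq_counter (tally : List String) :
    tally.foldl (fun (u : PySem.Dict String Int) i =>
      if !(u.contains i) then u.insert i 1 else u.insert i (u.getD i 0 + 1)) PySem.Dict.empty
    = PySem.Dict.counter tally := by
  rw [← PySem.Dict.foldl_insert_getD_add_one_eq_counter]
  apply PySem.List.foldl_congr_mem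
  intro u i _
  by_cases h : u.contains i = true
  · simp [h]
  · have h' : u.contains i = false := by simpa using h
    simp [h', PySem.Dict.getD_of_not_contains]

-- folding Set.add from a seed containing no element of m prepends the seed's head
lemma foldl_add_cons (a : String) (s m : List String) (ha : ∀ x ∈ m, x ≠ a) :
    m.foldl PySem.Set.add (a :: s) = a :: m.foldl PySem.Set.add s := by
  induction m generalizing s with
  | nil => rfl
  | cons x xs ih =>
    have hxa : x ≠ a := ha x (by simp)
    have : PySem.Set.add (a :: s) x = a :: PySem.Set.add s x := by
      by_cases hx : x ∈ s
      · rw [PySem.Set.add_of_mem hx, PySem.Set.add_of_mem (by simp [hx])]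
      · rw [PySem.Set.add_of_not_mem hx,
            PySem.Set.add_of_not_mem (by simp [hxa, hx])]
        rfl
    rw [List.foldl_cons, this, List.foldl_cons, ih _ (fun y hy => ha y (by simp [hy]))]

-- elements equal to a member of the seed can be dropped from the fold
lemma foldl_add_filter (c : String) (m s : List String) (hc : c ∈ s) :
    m.foldl PySem.Set.add s = (m.filter (fun x => x != c)).foldl PySem.Set.add s := by
  induction m generalizing s with
  | nil => rfl
  | cons x xs ih =>
    by_cases hx : x = c
    · subst hx
      have hf : (x :: xs).filter (fun y => y != x) = xs.filter (fun y => y != x) := by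
        simp
      rw [hf, List.foldl_cons, PySem.Set.add_of_mem hc, ih s hc]
    · have hb : (x != c) = true := by simpa using hx
      simp only [List.filter_cons, hb, List.foldl_cons]
      exact ih _ (by simp [PySem.Set.mem_add, hc])

-- first-appearance dedup peels its head and filters it from the rest
lemma ofList_cons_filter (c : String) (rest : List String) :
    PySem.Set.ofList (c :: rest)
      = c :: PySem.Set.ofList (rest.filter (fun x => x != c)) := by
  show (c :: rest).foldl PySem.Set.add [] = _
  rw [List.foldl_cons]
  have h0 : PySem.Set.add ([] : List String) c = [c] := by
    rw [PySem.Set.add_of_not_mem (by simp)]; rfl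
  rw [h0, foldl_add_filter c rest [c] (by simp),
      foldl_add_cons c [] _ (fun x hx => by simpa using (List.of_mem_filter hx))]
  rfl

-- B's recursion computes first-appearance candidates paired with their counts
lemma ucGo_eq_map_count_aux : ∀ (n : Nat) (l : List String), l.length ≤ n →
    ucGo l = (PySem.Set.ofList l).map (fun k => (k, (l.count k : Int))) := by
  intro n
  induction n with
  | zero =>
    intro l hl
    have : l = [] := List.eq_nil_of_length_eq_zero (Nat.le_zero.mp hl)
    subst this; rw [ucGo]; rfl
  | succ n ih =>
    intro l hl
    match l with
    | [] => rw [ucGo]; rfl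
    | c :: rest =>
      rw [ucGo]
      have hf : (c :: rest).filter (fun x => x != c) = rest.filter (fun x => x != c) := by
        simp
      have hlen : (rest.filter (fun x => x != c)).length ≤ n :=
        le_trans (List.length_filter_le _ _) (Nat.succ_le_succ_iff.mp (by simpa using hl))
      rw [hf, ofList_cons_filter, List.map_cons, ih _ hlen]
      have hsame : (((c :: rest).filter (fun x => x == c)).length : Int)
          = ((c :: rest).count c : Int) := by
        simp [List.count_eq_countP, List.countP_eq_length_filter]
      rw [hsame]
      congr 1
      apply List.map_congr_left
      intro k hk
      have hkc : k ≠ c := by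
        have h1 : k ∈ rest.filter (fun x => x != c) := (PySem.Set.mem_ofList _ _).mp hk
        simpa using (List.of_mem_filter h1)
      have hcnt : (rest.filter (fun x => x != c)).count k = (c :: rest).count k := by
        rw [List.count_filter (by simpa using hkc)]
        simp [Ne.symm hkc]
      rw [hcnt]

lemma ucGo_eq_map_count (l : List String) :
    ucGo l = (PySem.Set.ofList l).map (fun k => (k, (l.count k : Int))) :=
  ucGo_eq_map_count_aux l.length l le_rfl

-- ===== VERDICT (by name: the statement is the Claim_ definition above) =====
theorem unique_candidates_spec : Claim_equal_unique_candidates := by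
  intro votes_list _
  unfold Spec_unique_candidates unique_candidates unique_candidates_alt
  dsimp only
  rw [fold_eq_counter, PySem.Dict.items_counter, ucGo_eq_map_count]
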